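-- pv_equiv track=rewrite | github.com/tamsen/FSAtoBoecheraMSI | signal_processing/peak_analysis.py | filter_by_range
-- ===== SOURCE A (Python) =====
-- def filter_by_range(peak_x, peak_y, expected_range):
--     peaks_in_loci_range = []
--     for i in range(0, len(peak_x)):
--         x = peak_x[i]
--         y = peak_y[i]
--         if ((x >= expected_range[0]) and (x <= expected_range[1])):
--             peaks_in_loci_range.append([x, y])
--
--     peaks_in_loci_range.sort(key=lambda x: x[0])
--     return peaks_in_loci_range
-- ===== SOURCE B (Python) =====
-- def filter_by_range(peak_x, peak_y, expected_range):
--     pairs = []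
--     for i in range(len(peak_x)):
--         pairs.append([peak_x[i], peak_y[i]])
--     pairs.sort(key=lambda p: p[0])
--     lo, hi = expected_range[0], expected_range[1]
--     result = []
--     for p in pairs:
--         if p[0] > hi:
--             break
--         if p[0] >= lo:
--             result.append(p)
--     return result
-- ===== Notes on version B (the rewrite author's own statement) =====
-- stated objective: alternative
-- what changed: A filters the points into range during the index loop and then sorts the survivors; B builds all (x,y) pairs, sorts them once by x, and extracts the in-range band from the sorted list by a single scan with an early break once x exceeds the upper bound.
import Mathlib
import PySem

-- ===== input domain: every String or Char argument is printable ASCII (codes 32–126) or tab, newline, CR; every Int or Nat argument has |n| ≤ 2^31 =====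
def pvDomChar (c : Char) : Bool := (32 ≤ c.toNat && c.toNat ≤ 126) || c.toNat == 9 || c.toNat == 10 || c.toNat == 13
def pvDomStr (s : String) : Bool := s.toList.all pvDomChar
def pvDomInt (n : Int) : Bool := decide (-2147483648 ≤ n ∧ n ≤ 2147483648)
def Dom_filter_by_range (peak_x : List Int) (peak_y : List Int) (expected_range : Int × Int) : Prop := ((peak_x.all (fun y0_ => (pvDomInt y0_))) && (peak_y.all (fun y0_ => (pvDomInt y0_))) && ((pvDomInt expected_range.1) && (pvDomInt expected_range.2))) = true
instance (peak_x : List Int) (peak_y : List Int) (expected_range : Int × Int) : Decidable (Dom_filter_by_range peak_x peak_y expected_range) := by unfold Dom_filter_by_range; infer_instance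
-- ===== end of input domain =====

-- B replaces A's filter-then-sort by building all pairs, sorting once, and scanning the sorted
-- band with an early break (alternative decomposition, same cost class; equal return values).

-- ===== PORT A =====
-- key=lambda x: x[0]  (pairs built by the ports always have length 2, so pyGet? succeeds)
def pvKey (p : List Int) : Int := (PySem.List.pyGet? p 0).getD 0

def filter_by_range (peak_x : List Int) (peak_y : List Int) (expected_range : Int × Int) : List (List Int) :=
  let peaks_in_loci_range :=
    (PySem.List.pyRange 0 (peak_x.length : Int)).foldl
      (fun acc i =>
        let x := (PySem.List.pyGet? peak_x i).getD 0   -- in range for i in range(len(peak_x))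
        let y := (PySem.List.pyGet? peak_y i).getD 0   -- Pre_ guarantees the index is in range
        if x ≥ expected_range.1 ∧ x ≤ expected_range.2 then acc ++ [[x, y]] else acc) []
  PySem.List.sorted peaks_in_loci_range pvKey

-- ===== PORT B =====
-- the loop 'for p in pairs: if p[0] > hi: break; if p[0] >= lo: result.append(p)'
def pvScanB (lo hi : Int) : List (List Int) → List (List Int)
  | [] => []
  | p :: rest =>
    if pvKey p > hi then []
    else if pvKey p ≥ lo then p :: pvScanB lo hi rest
    else pvScanB lo hi rest

def filter_by_range_alt (peak_x : List Int) (peak_y : List Int) (expected_range : Int × Int) : List (List Int) :=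
  let pairs :=
    (PySem.List.pyRange 0 (peak_x.length : Int)).foldl
      (fun acc i => acc ++ [[(PySem.List.pyGet? peak_x i).getD 0, (PySem.List.pyGet? peak_y i).getD 0]]) []
  let sortedPairs := PySem.List.sorted pairs pvKey
  pvScanB expected_range.1 expected_range.2 sortedPairs

-- ===== PRECONDITION & SPEC =====
-- Pre_ excludes exactly the inputs where Python A raises IndexError: peak_y shorter than peak_x.
def Pre_filter_by_range (peak_x : List Int) (peak_y : List Int) (expected_range : Int × Int) : Prop :=
  peak_x.length ≤ peak_y.length
instance (peak_x : List Int) (peak_y : List Int) (expected_range : Int × Int) : Decidable (Pre_filter_by_range peak_x peak_y expected_range) := by unfold Pre_filter_by_range; infer_instance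

def pvWitness_filter_by_range : List Int × List Int × (Int × Int) := ([3, 1, 7], [10, 20, 30], (1, 5))

def Spec_filter_by_range (peak_x : List Int) (peak_y : List Int) (expected_range : Int × Int) (out : List (List Int)) : Prop := out = filter_by_range_alt peak_x peak_y expected_range
instance (peak_x : List Int) (peak_y : List Int) (expected_range : Int × Int) (out : List (List Int)) : Decidable (Spec_filter_by_range peak_x peak_y expected_range out) := by unfold Spec_filter_by_range; infer_instance

-- ===== CLAIM (what is proved, stated in full; the proofs are below) =====
def Claim_equal_filter_by_range : Prop := ∀ (peak_x : List Int) (peak_y : List Int) (expected_range : Int × Int), Dom_filter_by_range peak_x peak_y expected_range → Pre_filter_by_range peak_x peak_y expected_range → Spec_filter_by_range peak_x peak_y expected_range (filter_by_range peak_x peak_y expected_range)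

-- ===== LEMMAS AND PROOFS =====

@[simp] lemma pvKey_pair (a b : Int) : pvKey [a, b] = a := rfl

-- inserting before a list all of whose elements compare 'before'
lemma insertBy_cons_of_before {α : Type} (before : α → α → Bool) (x : α) (l : List α)
    (h : ∀ z ∈ l, before x z = true) :
    PySem.List.insertBy before x l = x :: l := by
  cases l with
  | nil => rfl
  | cons z zs => simp [PySem.List.insertBy, h z (List.mem_cons_self)]

-- filter commutes with a stable insertion into a key-sorted list
lemma filter_insertBy {α : Type} (key : α → Int) (q : α → Bool) (x : α) (ys : List α)
    (h : ys.Pairwise (fun a b => key a ≤ key b)) :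
    (PySem.List.insertBy (fun a b => decide (key a < key b)) x ys).filter q
      = if q x then PySem.List.insertBy (fun a b => decide (key a < key b)) x (ys.filter q)
        else ys.filter q := by
  induction ys with
  | nil => cases hqx : q x <;> simp [PySem.List.insertBy, List.filter, hqx]
  | cons y ys ih =>
    rcases List.pairwise_cons.mp h with ⟨hy, htail⟩
    by_cases hb : key x < key y
    · have hall : ∀ z ∈ (y :: ys).filter q, decide (key x < key z) = true := by
        intro z hz
        have hz' := List.mem_of_mem_filter hz
        rcases List.mem_cons.mp hz' with rfl | hz''
        · simpa using hb
        · simpa using lt_of_lt_of_le hb (hy z hz'')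
      rw [show PySem.List.insertBy (fun a b => decide (key a < key b)) x (y :: ys)
            = x :: y :: ys from by simp [PySem.List.insertBy, hb],
          insertBy_cons_of_before _ _ _ hall]
      cases hqx : q x <;> simp [List.filter_cons, hqx]
    · rw [show PySem.List.insertBy (fun a b => decide (key a < key b)) x (y :: ys)
            = y :: PySem.List.insertBy (fun a b => decide (key a < key b)) x ys from by
          simp [PySem.List.insertBy, hb]]
      by_cases hqy : q y
      · rw [List.filter_cons_of_pos hqy, ih htail, List.filter_cons_of_pos hqy]
        cases hqx : q x
        · simp
        · simp [PySem.List.insertBy, hb]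
      · rw [List.filter_cons_of_neg hqy, ih htail, List.filter_cons_of_neg hqy]

-- stability: filtering a stable sort = sorting the filtered list
lemma filter_sorted {α : Type} (key : α → Int) (q : α → Bool) (xs : List α) :
    (PySem.List.sorted xs key).filter q = PySem.List.sorted (xs.filter q) key := by
  induction xs using List.reverseRecOn with
  | nil => rfl
  | append_singleton xs x ih =>
    rw [PySem.List.sorted_eq_foldl_insertBy (xs ++ [x]), List.foldl_append,
        ← PySem.List.sorted_eq_foldl_insertBy xs]
    simp only [List.foldl_cons, List.foldl_nil]
    rw [filter_insertBy key q x _ (PySem.List.sorted_pairwise xs key), ih, List.filter_append]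
    by_cases hq : q x
    · simp only [hq, if_pos, List.filter_cons, List.filter_nil]
      rw [PySem.List.sorted_eq_foldl_insertBy (xs.filter q ++ [x]), List.foldl_append,
          ← PySem.List.sorted_eq_foldl_insertBy (xs.filter q)]
      simp [hq]
    · simp [hq]

-- the scan-with-break over a key-sorted list is the interval filter
lemma scan_eq_filter (lo hi : Int) (l : List (List Int))
    (h : l.Pairwise (fun a b => pvKey a ≤ pvKey b)) :
    pvScanB lo hi l = l.filter (fun p => decide (lo ≤ pvKey p ∧ pvKey p ≤ hi)) := by
  induction l with
  | nil => rfl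
  | cons p rest ih =>
    rcases List.pairwise_cons.mp h with ⟨hp, htail⟩
    rw [List.filter_cons]
    by_cases hhi : pvKey p > hi
    · have hq : (decide (lo ≤ pvKey p ∧ pvKey p ≤ hi)) = false := by
        simp only [decide_eq_false_iff_not]; intro hcon; omega
      have hrest : rest.filter (fun p => decide (lo ≤ pvKey p ∧ pvKey p ≤ hi)) = [] := by
        rw [List.filter_eq_nil_iff]
        intro z hz
        have hpz := hp z hz
        simp only [decide_eq_true_eq, not_and]
        intro _ hcon
        omega
      rw [pvScanB, if_pos (by omega), hq, hrest]
      simp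
    · by_cases hlo : pvKey p ≥ lo
      · have hq : (decide (lo ≤ pvKey p ∧ pvKey p ≤ hi)) = true := by
          simp only [decide_eq_true_eq]; omega
        rw [pvScanB, if_neg (by omega), if_pos (by omega), hq, ih htail]
        simp
      · have hq : (decide (lo ≤ pvKey p ∧ pvKey p ≤ hi)) = false := by
          simp only [decide_eq_false_iff_not]; intro hcon; omega
        rw [pvScanB, if_neg (by omega), if_neg (by omega), hq, ih htail]
        simp

-- scan of a sort = sort of the interval filter
lemma band_of_sorted (lo hi : Int) (xs : List (List Int)) :
    pvScanB lo hi (PySem.List.sorted xs pvKey)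
      = PySem.List.sorted (xs.filter (fun p => decide (lo ≤ pvKey p ∧ pvKey p ≤ hi))) pvKey := by
  rw [scan_eq_filter lo hi _ (PySem.List.sorted_pairwise xs pvKey), filter_sorted]

-- ===== VERDICT (by name: the statement is the Claim_ definition above) =====
theorem filter_by_range_spec : Claim_equal_filter_by_range := by
  intro peak_x peak_y er _ _
  unfold Spec_filter_by_range filter_by_range filter_by_range_alt
  have hAB : (PySem.List.pyRange 0 (peak_x.length : Int)).foldl
      (fun acc i =>
        let x := (PySem.List.pyGet? peak_x i).getD 0
        let y := (PySem.List.pyGet? peak_y i).getD 0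
        if x ≥ er.1 ∧ x ≤ er.2 then acc ++ [[x, y]] else acc) []
      = ((PySem.List.pyRange 0 (peak_x.length : Int)).foldl
          (fun acc i => acc ++ [[(PySem.List.pyGet? peak_x i).getD 0, (PySem.List.pyGet? peak_y i).getD 0]]) []).filter
          (fun p => decide (er.1 ≤ pvKey p ∧ pvKey p ≤ er.2)) := by
    rw [show (fun (acc : List (List Int)) (i : Int) =>
          let x := (PySem.List.pyGet? peak_x i).getD 0
          let y := (PySem.List.pyGet? peak_y i).getD 0
          if x ≥ er.1 ∧ x ≤ er.2 then acc ++ [[x, y]] else acc)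
        = (fun acc i =>
            if (fun j => decide (er.1 ≤ pvKey ([(PySem.List.pyGet? peak_x j).getD 0, (PySem.List.pyGet? peak_y j).getD 0] : List Int)
                  ∧ pvKey ([(PySem.List.pyGet? peak_x j).getD 0, (PySem.List.pyGet? peak_y j).getD 0] : List Int) ≤ er.2)) i = true
            then acc ++ [(fun j => ([(PySem.List.pyGet? peak_x j).getD 0, (PySem.List.pyGet? peak_y j).getD 0] : List Int)) i] else acc) from by
          funext acc i
          simp only [pvKey_pair, ge_iff_le, decide_eq_true_eq]]
    rw [PySem.List.foldl_append_if, PySem.List.foldl_append_singleton_eq_map, List.nil_append,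
        List.nil_append, List.filter_map]
    rfl
  simp only [hAB, band_of_sorted]
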